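-- pv_equiv track=rewrite | github.com/shamanthkumar1996/pythonandPlaywright | DSA/MoveAllZerosToEnd.py | move_ones_to_end
-- ===== SOURCE A (Python) =====
-- def move_ones_to_end(nums):
--     write =0
--     for num in nums:
--         if num !=1:
--             nums[write] = num
--             write +=1
--
--     while write < (len(nums)):
--         nums[write] = 1
--         write +=1
--     return nums
-- ===== SOURCE B (Python) =====
-- def move_ones_to_end(nums):
--     # stable sort on a boolean key: False (non-one) before True (one);
--     # Timsort's stability keeps the non-one elements in original order
--     nums.sort(key=lambda x: x == 1)
--     return nums
-- ===== Notes on version B (the rewrite author's own statement) =====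
-- stated objective: idiomatic
-- what changed: A compacts non-one values with a write pointer and then runs a second fill loop; B instead stable-sorts the list in place on the boolean key (x == 1), relying on sort stability to keep non-ones in order and push all 1s to the tail.
import Mathlib
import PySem

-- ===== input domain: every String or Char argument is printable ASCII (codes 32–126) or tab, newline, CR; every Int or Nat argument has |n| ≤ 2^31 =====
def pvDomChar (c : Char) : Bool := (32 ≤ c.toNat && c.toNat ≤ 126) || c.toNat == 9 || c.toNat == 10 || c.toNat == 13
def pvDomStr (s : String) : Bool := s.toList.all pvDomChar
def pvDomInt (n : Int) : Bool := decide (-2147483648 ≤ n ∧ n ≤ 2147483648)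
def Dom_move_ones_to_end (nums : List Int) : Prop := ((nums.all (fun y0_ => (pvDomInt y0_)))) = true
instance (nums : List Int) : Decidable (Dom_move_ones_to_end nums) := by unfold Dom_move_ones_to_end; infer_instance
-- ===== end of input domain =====

-- B replaces A's compact-then-fill two-loop write-pointer scheme by an in-place
-- stable sort on the boolean key (x == 1). Both Pythons mutate nums in place and
-- return it; the equivalence proved here is about the returned value.

-- ===== PORT A =====
-- A's second loop: while write < len(nums): nums[write] = 1; write += 1
def pvFillOnes (arr : List Int) (w : Nat) : List Int :=
  if h : w < arr.length then pvFillOnes (arr.set w 1) (w + 1) else arr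
termination_by arr.length - w
decreasing_by simp [List.length_set]; omega

-- 'for num in nums' with in-place writes: every write lands at index write ≤ the
-- current read index, and when equal it rewrites the same value, so iterating the
-- original elements is exact.
def move_ones_to_end (nums : List Int) : List Int :=
  let s := nums.foldl (fun (st : List Int × Nat) num =>
    if num ≠ 1 then (st.1.set st.2 num, st.2 + 1) else st) (nums, 0)
  pvFillOnes s.1 s.2

-- ===== PORT B =====
-- nums.sort(key=lambda x: x == 1): Python's stable sort with boolean keys, which
-- compare as the ints False=0 < True=1 — ported exactly by PySem.List.sorted with
-- that 0/1 integer key.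
def move_ones_to_end_alt (nums : List Int) : List Int :=
  PySem.List.sorted nums (fun x => if x = 1 then (1 : Int) else 0) false

-- ===== PRECONDITION & SPEC =====
def Spec_move_ones_to_end (nums : List Int) (out : List Int) : Prop := out = move_ones_to_end_alt nums
instance (nums : List Int) (out : List Int) : Decidable (Spec_move_ones_to_end nums out) := by unfold Spec_move_ones_to_end; infer_instance

-- ===== CLAIM (what is proved, stated in full; the proofs are below) =====
def Claim_equal_move_ones_to_end : Prop := ∀ (nums : List Int), Dom_move_ones_to_end nums → Spec_move_ones_to_end nums (move_ones_to_end nums)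

-- ===== LEMMAS AND PROOFS =====

-- Invariant for A's first loop: running it over l with array K ++ r and write
-- pointer K.length compacts l's non-one elements right after K.
theorem pv_fold_inv (l K r : List Int)
    (h : (l.filter (fun x => x ≠ 1)).length ≤ r.length) :
    l.foldl (fun (st : List Int × Nat) num =>
      if num ≠ 1 then (st.1.set st.2 num, st.2 + 1) else st) (K ++ r, K.length)
      = (K ++ l.filter (fun x => x ≠ 1) ++ r.drop (l.filter (fun x => x ≠ 1)).length,
         K.length + (l.filter (fun x => x ≠ 1)).length) := by
  induction l generalizing K r with
  | nil => simp
  | cons num l ih =>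
    by_cases hn : num = 1
    · subst hn
      simpa using ih K r (by simpa using h)
    · have hf : (num :: l).filter (fun x => x ≠ 1) = num :: l.filter (fun x => x ≠ 1) := by
        simp [hn]
      rw [hf] at h ⊢
      obtain ⟨y, r', rfl⟩ : ∃ y r', r = y :: r' := by
        cases r with
        | nil => simp at h
        | cons y r' => exact ⟨y, r', rfl⟩
      have hset : (K ++ y :: r').set K.length num = (K ++ [num]) ++ r' := by
        rw [List.set_append_right _ _ (le_refl _)]
        simp
      simp only [List.foldl_cons, if_pos hn, hset]
      have := ih (K ++ [num]) r' (by simp at h ⊢; omega)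
      simp only [List.length_append, List.length_cons, List.length_nil] at this ⊢
      rw [this]
      simp
      omega

-- A's second loop fills everything from position K.length on with 1s.
theorem pv_fill_eq (K r : List Int) :
    pvFillOnes (K ++ r) K.length = K ++ List.replicate r.length 1 := by
  induction r generalizing K with
  | nil => rw [pvFillOnes]; simp
  | cons y r' ih =>
    rw [pvFillOnes]
    have hlt : K.length < (K ++ y :: r').length := by simp
    rw [dif_pos hlt]
    have hset : (K ++ y :: r').set K.length 1 = (K ++ [1]) ++ r' := by
      rw [List.set_append_right _ _ (le_refl _)]
      simp
    have := ih (K ++ [1])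
    simp only [List.length_append, List.length_cons, List.length_nil] at this ⊢
    rw [hset]
    simp only [Nat.zero_add] at this ⊢
    rw [this]
    simp [List.replicate_succ]

-- The boolean key of B's sort, as the 0/1 integer Python compares.
def pvKey (x : Int) : Int := if x = 1 then 1 else 0

-- insertBy on a compacted state: a non-one element lands right before the 1-tail.
theorem pv_insert_ne (x : Int) (hx : x ≠ 1) (K : List Int) (hK : ∀ y ∈ K, y ≠ (1 : Int)) (m : Nat) :
    PySem.List.insertBy (fun a b => decide (pvKey a < pvKey b)) x (K ++ List.replicate m 1)
      = (K ++ [x]) ++ List.replicate m 1 := by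
  induction K with
  | nil =>
    cases m with
    | zero => simp [PySem.List.insertBy]
    | succ m => simp [PySem.List.insertBy, List.replicate_succ, pvKey, hx]
  | cons y K ih =>
    have hy : y ≠ (1 : Int) := hK y (by simp)
    have := ih (fun z hz => hK z (by simp [hz]))
    simp [PySem.List.insertBy, pvKey, hx, hy] at this ⊢
    exact this

-- … and a 1 lands at the very end.
theorem pv_insert_one (K : List Int) (hK : ∀ y ∈ K, y ≠ (1 : Int)) (m : Nat) :
    PySem.List.insertBy (fun a b => decide (pvKey a < pvKey b)) 1 (K ++ List.replicate m 1)
      = K ++ List.replicate (m + 1) 1 := by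
  induction K with
  | nil =>
    induction m with
    | zero => simp [PySem.List.insertBy]
    | succ m ihm =>
      simp [PySem.List.insertBy, List.replicate_succ, pvKey] at ihm ⊢
      exact ihm
  | cons y K ih =>
    have hy : y ≠ (1 : Int) := hK y (by simp)
    have := ih (fun z hz => hK z (by simp [hz]))
    simp [PySem.List.insertBy, pvKey, hy] at this ⊢
    exact this

-- Invariant for B's insertion sort: folding l into a compacted state keeps it
-- compacted, appending l's non-ones after K and counting its 1s into the tail.
theorem pv_sort_inv (l K : List Int) (hK : ∀ y ∈ K, y ≠ (1 : Int)) (m : Nat) :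
    l.foldl (fun acc x => PySem.List.insertBy (fun a b => decide (pvKey a < pvKey b)) x acc)
        (K ++ List.replicate m 1)
      = (K ++ l.filter (fun x => x ≠ 1)) ++ List.replicate (m + l.countP (fun x => decide (x = 1))) 1 := by
  induction l generalizing K m with
  | nil => simp
  | cons x l ih =>
    by_cases hx : x = 1
    · subst hx
      simp only [List.foldl_cons, pv_insert_one K hK m]
      rw [ih K hK (m + 1)]
      simp
      ring_nf
    · simp only [List.foldl_cons, pv_insert_ne x hx K hK m]
      have hK' : ∀ y ∈ K ++ [x], y ≠ (1 : Int) := by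
        intro y hy
        rcases List.mem_append.mp hy with h | h
        · exact hK y h
        · simp at h; simpa [h] using hx
      rw [ih (K ++ [x]) hK' m]
      simp [hx]

-- B's sort produces exactly "non-ones, then that many 1s".
theorem pv_alt_eq (nums : List Int) :
    move_ones_to_end_alt nums
      = nums.filter (fun x => x ≠ 1) ++ List.replicate (nums.countP (fun x => decide (x = 1))) 1 := by
  unfold move_ones_to_end_alt
  rw [PySem.List.sorted_eq_foldl_insertBy]
  have := pv_sort_inv nums [] (by simp) 0
  simpa [pvKey] using this

theorem move_ones_to_end_spec : Claim_equal_move_ones_to_end := by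
  intro nums _
  unfold Spec_move_ones_to_end move_ones_to_end
  have hle : (nums.filter (fun x => x ≠ 1)).length ≤ nums.length :=
    List.length_filter_le _ _
  have h := pv_fold_inv nums [] nums hle
  simp only [List.nil_append, List.length_nil] at h
  simp only [h, Nat.zero_add]
  have hfill := pv_fill_eq (nums.filter (fun x => x ≠ 1))
      (nums.drop (nums.filter (fun x => x ≠ 1)).length)
  simp only [List.length_drop] at hfill
  simp only [hfill, pv_alt_eq]
  congr 1
  have h1 := (List.length_eq_length_filter_add (l := nums) (fun x => decide (x = 1))).symm
  have h2 : nums.countP (fun x => decide (x = 1))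
      = (nums.filter (fun x => decide (x = 1))).length := List.countP_eq_length_filter
  have h3 : (nums.filter (fun x => decide (x ≠ 1))).length
      = (nums.filter (fun x => !decide (x = 1))).length := by
    congr 1
    apply List.filter_congr
    intro x _
    simp
  rw [h3]
  congr 1
  omega
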